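-- pv_equiv track=rewrite | github.com/MrBrantCode/unitest_baseline | mut_generate/mist_train_cf/cf_51771/solution.py | correct_code
-- ===== SOURCE A (Python) =====
-- def correct_code(arr):
--     left, right = 0, len(arr) - 1
--     while left < right:
--         if not arr[left].isalpha():
--             left += 1
--             continue
--         if arr[right].isdigit():
--             right -= 1
--             continue
--         arr[left], arr[right] = arr[right], arr[left]
--         left += 1
--         right -= 1
--     return arr
-- ===== SOURCE B (Python) =====
-- def correct_code(arr):
--     n = len(arr)
--     L = [i for i in range(n) if arr[i].isalpha()]
--     R = [j for j in range(n - 1, -1, -1) if not arr[j].isdigit()]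
--     for i, j in zip(L, R):
--         if i >= j:
--             break
--         arr[i], arr[j] = arr[j], arr[i]
--     return arr
-- ===== Notes on version B (the rewrite author's own statement) =====
-- stated objective: alternative
-- what changed: Replaces A's interleaved two-pointer stepping with two precomputed index scans (ascending alpha indices, descending non-digit indices) followed by one paired swap loop that stops at the first crossing pair.
import Mathlib
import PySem

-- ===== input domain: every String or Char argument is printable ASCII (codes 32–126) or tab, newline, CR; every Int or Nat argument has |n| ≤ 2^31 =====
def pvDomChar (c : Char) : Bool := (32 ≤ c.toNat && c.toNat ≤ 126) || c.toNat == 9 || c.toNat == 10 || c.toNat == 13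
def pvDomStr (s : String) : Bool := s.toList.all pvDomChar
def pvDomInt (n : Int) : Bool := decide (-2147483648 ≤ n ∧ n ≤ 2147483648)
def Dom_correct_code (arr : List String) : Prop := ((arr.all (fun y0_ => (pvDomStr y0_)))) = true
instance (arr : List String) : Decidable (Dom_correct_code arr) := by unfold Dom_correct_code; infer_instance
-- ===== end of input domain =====

-- B replaces A's interleaved two-pointer stepping by two precomputed index scans plus one paired
-- swap loop (alternative decomposition, same cost); both Pythons mutate arr in place the same way,
-- and the equivalence proved here is about the returned list value.


-- ===== PORT A =====
-- arr[left], arr[right] = arr[right], arr[left]  (indices are in range whenever the loop body runs)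
def pvSwapA (arr : List String) (i j : Int) : List String :=
  let vi := (PySem.List.pyGet? arr i).getD ""
  let vj := (PySem.List.pyGet? arr j).getD ""
  PySem.List.pySetD (PySem.List.pySetD arr i vj) j vi

-- the while loop of A, with pointers left (l) and right (r)
def pvALoop (arr : List String) (l r : Int) : List String :=
  if _h : l < r then
    if !(PySem.Str.strIsalpha ((PySem.List.pyGet? arr l).getD "")) then
      pvALoop arr (l + 1) r
    else if PySem.Str.strIsdigit ((PySem.List.pyGet? arr r).getD "") then
      pvALoop arr l (r - 1)
    else
      pvALoop (pvSwapA arr l r) (l + 1) (r - 1)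
  else arr
termination_by (r - l).toNat
decreasing_by all_goals omega

def correct_code (arr : List String) : List String :=
  pvALoop arr 0 ((arr.length : Int) - 1)

-- ===== PORT B =====
-- the 'for i, j in zip(L, R)' loop with its break and in-place tuple swap
def pvBLoop (arr : List String) (ps : List (Nat × Nat)) : List String :=
  match ps with
  | [] => arr
  | (i, j) :: t =>
    if i ≥ j then arr
    else pvBLoop ((arr.set i (arr.getD j "")).set j (arr.getD i "")) t

def correct_code_alt (arr : List String) : List String :=
  pvBLoop arr
    (((List.range arr.length).filter (fun i => PySem.Str.strIsalpha (arr.getD i ""))).zip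
     (((List.range arr.length).reverse).filter (fun j => !(PySem.Str.strIsdigit (arr.getD j "")))))

-- ===== PRECONDITION & SPEC =====
def Spec_correct_code (arr : List String) (out : List String) : Prop := out = correct_code_alt arr
instance (arr : List String) (out : List String) : Decidable (Spec_correct_code arr out) := by unfold Spec_correct_code; infer_instance

-- ===== CLAIM (what is proved, stated in full; the proofs are below) =====
def Claim_equal_correct_code : Prop := ∀ (arr : List String), Dom_correct_code arr → Spec_correct_code arr (correct_code arr)

-- ===== LEMMAS AND PROOFS =====

-- a nonempty all-alpha Python string is not all-digit
theorem pv_alpha_not_digit (s : String) (h : PySem.Str.strIsalpha s = true) :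
    PySem.Str.strIsdigit s = false := by
  simp [PySem.Str.strIsalpha, PySem.Str.strIsdigit, PySem.Chars.strIsalpha, PySem.Chars.strIsdigit,
        PySem.Chars.isalpha, PySem.Chars.isdigit, PySem.Chars.isupper, PySem.Chars.islower] at *
  rcases h with ⟨h1, h2⟩
  intro _
  have hne : s.toList ≠ [] := by
    intro he; apply h1; cases s; simp_all
  obtain ⟨c, hc⟩ := List.exists_mem_of_ne_nil _ hne
  have := h2 c hc
  refine ⟨c, hc, fun h0 => ?_⟩
  rcases this with h | h
  · exact lt_of_lt_of_le (by decide : '9' < 'A') h.1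
  · exact lt_of_lt_of_le (by decide : '9' < 'a') h.1

-- k indices starting at l, ascending, filtered by p
def pvUpK (p : Nat → Bool) : Nat → Nat → List Nat
  | _, 0 => []
  | l, k + 1 => (if p l then [l] else []) ++ pvUpK p (l + 1) k

-- ascending indices i with l ≤ i < n and p i
def pvUpI (p : Nat → Bool) (n l : Nat) : List Nat := pvUpK p l (n - l)

-- descending indices j with j < m and p j
def pvDown (p : Nat → Bool) : Nat → List Nat
  | 0 => []
  | m + 1 => (if p m then [m] else []) ++ pvDown p m

theorem pv_mem_upK {p : Nat → Bool} : ∀ {k l i : Nat}, i ∈ pvUpK p l k → l ≤ i := by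
  intro k
  induction k with
  | zero => intro l i h; simp [pvUpK] at h
  | succ k ih =>
    intro l i h
    simp only [pvUpK, List.mem_append] at h
    rcases h with h | h
    · split at h <;> simp_all
    · exact Nat.le_of_succ_le (ih h)

theorem pv_mem_upI {p : Nat → Bool} {n l i : Nat} (h : i ∈ pvUpI p n l) : l ≤ i :=
  pv_mem_upK h

theorem pv_mem_down {p : Nat → Bool} : ∀ {m j : Nat}, j ∈ pvDown p m → j < m := by
  intro m
  induction m with
  | zero => intro j h; simp [pvDown] at h
  | succ m ih =>
    intro j h
    simp only [pvDown, List.mem_append] at h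
    rcases h with h | h
    · split at h <;> simp_all
    · exact Nat.lt_succ_of_lt (ih h)

theorem pv_upK_congr {p q : Nat → Bool} : ∀ (k l : Nat),
    (∀ i, l ≤ i → i < l + k → p i = q i) → pvUpK p l k = pvUpK q l k := by
  intro k
  induction k with
  | zero => intro l _; rfl
  | succ k ih =>
    intro l h
    simp only [pvUpK]
    rw [h l le_rfl (by omega), ih (l + 1) (fun i hi hn => h i (by omega) (by omega))]

theorem pv_upI_congr {p q : Nat → Bool} (n l : Nat)
    (h : ∀ i, l ≤ i → i < n → p i = q i) : pvUpI p n l = pvUpI q n l :=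
  pv_upK_congr (n - l) l (fun i hi hn => h i hi (by omega))

theorem pv_down_congr {p q : Nat → Bool} : ∀ (m : Nat),
    (∀ j, j < m → p j = q j) → pvDown p m = pvDown q m := by
  intro m
  induction m with
  | zero => intro _; rfl
  | succ m ih =>
    intro h
    simp only [pvDown]
    rw [h m (by omega), ih (fun j hj => h j (by omega))]

theorem pv_upK_split {p : Nat → Bool} : ∀ (k1 k2 l : Nat),
    pvUpK p l (k1 + k2) = pvUpK p l k1 ++ pvUpK p (l + k1) k2 := by
  intro k1
  induction k1 with
  | zero => intro k2 l; simp [pvUpK]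
  | succ k1 ih =>
    intro k2 l
    rw [show k1 + 1 + k2 = (k1 + k2) + 1 from by omega]
    simp only [pvUpK, List.append_assoc]
    rw [ih k2 (l + 1), show l + (k1 + 1) = l + 1 + k1 from by omega]

theorem pv_upI_split {p : Nat → Bool} {n r : Nat} (l : Nat) (hlr : l ≤ r) (hrn : r ≤ n) :
    pvUpI p n l = pvUpI p r l ++ pvUpI p n r := by
  unfold pvUpI
  have h : n - l = (r - l) + (n - r) := by omega
  rw [h, pv_upK_split]
  congr 2
  omega

theorem pv_upI_step {p : Nat → Bool} {n l : Nat} (h : l < n) :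
    pvUpI p n l = (if p l then [l] else []) ++ pvUpI p n (l + 1) := by
  unfold pvUpI
  have h1 : n - l = (n - (l + 1)) + 1 := by omega
  rw [h1]
  rfl

-- bLoop ignores zip-partners beyond a crossing: a high tail of the left list never swaps
theorem pv_bloop_drop_high (M : List Nat) :
    ∀ (arr : List String) (S R : List Nat), (∀ i ∈ S, ∀ j ∈ R, j ≤ i) →
      pvBLoop arr ((M ++ S).zip R) = pvBLoop arr (M.zip R) := by
  induction M with
  | nil =>
    intro arr S R h
    cases S with
    | nil => rfl
    | cons s S' =>
      cases R with
      | nil => rfl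
      | cons j R' =>
        simp only [List.nil_append, List.zip_cons_cons, pvBLoop]
        rw [if_pos (h s (by simp) j (by simp))]
        rfl
  | cons m M' ih =>
    intro arr S R h
    cases R with
    | nil => rfl
    | cons j R' =>
      simp only [List.cons_append, List.zip_cons_cons, pvBLoop]
      split
      · rfl
      · exact ih _ S R' (fun i hi j' hj' => h i hi j' (by simp [hj']))

-- bLoop returns arr when every candidate pair already crosses
theorem pv_bloop_crossed {arr : List String} {L R : List Nat}
    (h : ∀ i ∈ L, ∀ j ∈ R, j ≤ i) : pvBLoop arr (L.zip R) = arr := by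
  cases L with
  | nil => rfl
  | cons i L' =>
    cases R with
    | nil => rfl
    | cons j R' =>
      simp only [List.zip_cons_cons, pvBLoop]
      rw [if_pos (h i (by simp) j (by simp))]

-- the two concrete predicates of a list
def pvPA (arr : List String) : Nat → Bool := fun i => PySem.Str.strIsalpha (arr.getD i "")
def pvPD (arr : List String) : Nat → Bool := fun j => !(PySem.Str.strIsdigit (arr.getD j ""))

theorem pv_pyget {arr : List String} {i : Int} (h0 : 0 ≤ i) :
    (PySem.List.pyGet? arr i).getD "" = arr.getD i.toNat "" := by
  conv_lhs => rw [← Int.toNat_of_nonneg h0]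
  rw [PySem.List.pyGet?_natCast]
  simp [List.getD_eq_getElem?_getD]

-- MAIN LOOP INVARIANT: A's loop equals B's swap loop on the precomputed index lists
theorem pv_main (N : Nat) : ∀ (arr : List String) (l r : Int), 0 ≤ l → r < arr.length →
    (r - l).toNat ≤ N →
    pvALoop arr l r
      = pvBLoop arr ((pvUpI (pvPA arr) arr.length l.toNat).zip (pvDown (pvPD arr) (r + 1).toNat)) := by
  induction N with
  | zero =>
    intro arr l r hl hr hN
    have hlr : ¬ l < r := by omega
    rw [pvALoop, dif_neg hlr]
    refine (pv_bloop_crossed ?_).symm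
    intro i hi j hj
    have h1 := pv_mem_upI hi
    have h2 := pv_mem_down hj
    omega
  | succ N ih =>
    intro arr l r hl hr hN
    by_cases hlr : l < r
    · have hlt : l.toNat < arr.length := by omega
      have hrt : r.toNat < arr.length := by omega
      have hr0 : (0 : Int) ≤ r := by omega
      rw [pvALoop, dif_pos hlr, pv_pyget hl, pv_pyget hr0]
      by_cases ha : PySem.Str.strIsalpha (arr.getD l.toNat "") = true
      · rw [if_neg (by rw [ha]; decide)]
        by_cases hd : PySem.Str.strIsdigit (arr.getD r.toNat "") = true
        · -- right pointer steps down
          have hr1 : (r - 1 : Int) < (arr.length : Int) := by omega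
          have hN1 : ((r - 1) - l).toNat ≤ N := by omega
          rw [if_pos hd, ih arr l (r - 1) hl hr1 hN1]
          have hdd : pvDown (pvPD arr) (r + 1).toNat = pvDown (pvPD arr) ((r - 1) + 1).toNat := by
            rw [show (r + 1).toNat = ((r - 1) + 1).toNat + 1 from by omega]
            simp only [pvDown]
            rw [if_neg (show ¬ pvPD arr ((r - 1) + 1).toNat = true from by
                  simp only [pvPD]
                  rw [show ((r - 1) + 1).toNat = r.toNat from by omega, hd]
                  decide)]
            simp
          rw [hdd]
        · -- swap case
          have hdX : PySem.Str.strIsdigit (arr.getD r.toNat "") = false := Bool.eq_false_iff.mpr hd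
          rw [if_neg hd]
          set arr' := pvSwapA arr l r with harr'
          have hswap : arr' = (arr.set l.toNat (arr.getD r.toNat "")).set r.toNat (arr.getD l.toNat "") := by
            simp only [harr', pvSwapA]
            rw [pv_pyget hl, pv_pyget hr0,
                PySem.List.pySetD_of_nonneg _ _ hl, PySem.List.pySetD_of_nonneg _ _ hr0]
          have hlen' : arr'.length = arr.length := by rw [hswap]; simp
          rw [ih arr' (l + 1) (r - 1) (by omega) (by rw [hlen']; omega) (by omega)]
          have hne : l.toNat ≠ r.toNat := by omega
          have hgl : ∀ i : Nat, i ≠ l.toNat → i ≠ r.toNat → arr'.getD i "" = arr.getD i "" := by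
            intro i h1 h2
            rw [hswap]
            simp only [List.getD_eq_getElem?_getD, List.getElem?_set, List.length_set]
            rw [if_neg (fun h => h2 h.symm), if_neg (fun h => h1 h.symm)]
          have hglr : arr'.getD l.toNat "" = arr.getD r.toNat "" := by
            rw [hswap]
            simp only [List.getD_eq_getElem?_getD, List.getElem?_set, List.length_set]
            rw [if_neg (fun h => hne h.symm), if_pos trivial, if_pos hlt]
            rfl
          have hcast1 : (l + 1).toNat = l.toNat + 1 := by omega
          have hcast2 : ((r - 1) + 1).toNat = r.toNat := by omega
          rw [hcast1, hcast2, hlen']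
          -- index lists of arr' reduced to index lists of arr
          have hdown : pvDown (pvPD arr') r.toNat = pvDown (pvPD arr) r.toNat := by
            apply pv_down_congr
            intro j hj
            simp only [pvPD]
            by_cases hjl : j = l.toNat
            · subst hjl
              rw [hglr, hdX, pv_alpha_not_digit _ ha]
            · rw [hgl j hjl (by omega)]
          have hupC : pvUpI (pvPA arr') r.toNat (l.toNat + 1) = pvUpI (pvPA arr) r.toNat (l.toNat + 1) := by
            apply pv_upI_congr
            intro i hi hin
            simp only [pvPA]
            rw [hgl i (by omega) (by omega)]
          have hLsplit' : pvUpI (pvPA arr') arr.length (l.toNat + 1)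
              = pvUpI (pvPA arr') r.toNat (l.toNat + 1) ++ pvUpI (pvPA arr') arr.length r.toNat :=
            pv_upI_split _ (by omega) (by omega)
          have hLsplit : pvUpI (pvPA arr) arr.length (l.toNat + 1)
              = pvUpI (pvPA arr) r.toNat (l.toNat + 1) ++ pvUpI (pvPA arr) arr.length r.toNat :=
            pv_upI_split _ (by omega) (by omega)
          rw [hLsplit', hupC, hdown,
              pv_bloop_drop_high _ arr' _ _
                (fun i hi j hj => by have := pv_mem_upI hi; have := pv_mem_down hj; omega)]
          -- now peel the first pair (l.toNat, r.toNat) on the RHS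
          rw [pv_upI_step (p := pvPA arr) hlt, if_pos (show pvPA arr l.toNat = true from ha)]
          rw [show (r + 1).toNat = r.toNat + 1 from by omega]
          simp only [pvDown]
          rw [if_pos (show pvPD arr r.toNat = true from by
                simp only [pvPD]; rw [hdX]; rfl)]
          simp only [List.singleton_append, List.zip_cons_cons, pvBLoop]
          rw [if_neg (by omega : ¬ l.toNat ≥ r.toNat)]
          rw [← hswap, hLsplit,
              pv_bloop_drop_high _ arr' _ _
                (fun i hi j hj => by have := pv_mem_upI hi; have := pv_mem_down hj; omega)]
      · -- left pointer steps up
        have hX : PySem.Str.strIsalpha (arr.getD l.toNat "") = false := Bool.eq_false_iff.mpr ha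
        rw [if_pos (by rw [hX]; decide),
            ih arr (l + 1) r (by omega) hr (by omega)]
        rw [show (l + 1).toNat = l.toNat + 1 from by omega,
            pv_upI_step (p := pvPA arr) hlt,
            if_neg (show ¬ pvPA arr l.toNat = true from fun hc => ha hc)]
        rw [List.nil_append]
    · rw [pvALoop, dif_neg hlr]
      refine (pv_bloop_crossed ?_).symm
      intro i hi j hj
      have h1 := pv_mem_upI hi
      have h2 := pv_mem_down hj
      omega

-- bridge: the port's range-filters are pvUpI / pvDown
theorem pv_range'_filter (p : Nat → Bool) : ∀ (k l : Nat), (List.range' l k).filter p = pvUpK p l k := by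
  intro k
  induction k with
  | zero => intro l; rfl
  | succ k ih =>
    intro l
    rw [List.range'_succ]
    simp only [List.filter_cons, pvUpK]
    rw [← ih (l + 1)]
    split <;> simp

theorem pv_range_filter (p : Nat → Bool) (n : Nat) : (List.range n).filter p = pvUpI p n 0 := by
  rw [List.range_eq_range', pv_range'_filter]
  unfold pvUpI
  rw [Nat.sub_zero]

theorem pv_range_rev_filter (p : Nat → Bool) : ∀ (n : Nat), ((List.range n).reverse).filter p = pvDown p n := by
  intro n
  induction n with
  | zero => rfl
  | succ n ih =>
    rw [List.range_succ]
    simp only [List.reverse_append, List.reverse_cons, List.reverse_nil, List.nil_append,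
               List.singleton_append, List.filter_cons, pvDown]
    rw [← ih]
    split <;> simp

-- ===== VERDICT (by name: the statement is the Claim_ definition above) =====
theorem correct_code_spec : Claim_equal_correct_code := by
  unfold Claim_equal_correct_code
  intro arr _
  unfold Spec_correct_code correct_code correct_code_alt
  rw [pv_range_filter, pv_range_rev_filter]
  rw [pv_main (arr.length : Int).toNat arr 0 ((arr.length : Int) - 1)
        (by omega) (by omega) (by omega)]
  rw [show ((arr.length : Int) - 1 + 1).toNat = arr.length from by omega]
  rfl
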